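-- pv_equiv track=rewrite | github.com/nothingbout/aoc2023 | day13/prob.py | summarize_reflections
-- ===== SOURCE A (Python) =====
-- def transpose_grid(rows):
--     grid_w, grid_h = (len(rows[0]), len(rows))
--     cols = ["" for _ in range(grid_w)]
--     for y in range(grid_h):
--         for x in range(grid_w):
--             cols[x] += rows[y][x]
--     return cols
--
-- def rows_diff(a: str, b: str):
--     diff = 0
--     for i in range(0, len(a)):
--         if a[i] != b[i]: diff += 1
--     return diff
--
-- def find_reflection(rows, expected_diff):
--     num_rows = len(rows)
--     reflection = None
--
--     for start_pos in range(1, num_rows):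
--         pos_pairs = []
--         for offset in range(0, min(start_pos, num_rows - start_pos)):
--             pos_pairs.append((start_pos - 1 - offset, start_pos + offset))
--
--         total_diff = 0
--         for i, j in pos_pairs:
--             total_diff += rows_diff(rows[i], rows[j])
--
--         if total_diff == expected_diff:
--             if reflection is None:
--                 reflection = start_pos
--             else:
--                 raise "found more than one row/col reflection"
--
--     return reflection
--
-- def summarize_reflections(grids, expected_diff):
--     summary = 0
--     for rows in grids:
--         cols = transpose_grid(rows)
--
--         cols_reflection = find_reflection(cols, expected_diff)
--         rows_reflection = find_reflection(rows, expected_diff)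
--
--         if cols_reflection is not None and rows_reflection is not None:
--             raise "found both a col and a row reflection"
--
--         if cols_reflection is not None:
--             summary += cols_reflection
--
--         if rows_reflection is not None:
--             summary += 100 * rows_reflection
--
--     return summary
-- ===== SOURCE B (Python) =====
-- def _axes_sum(n, pair_diff, expected_diff):
--     # Histogram of pairwise mismatch counts keyed by index-pair sum: the pairs
--     # mirrored around an axis at position p are exactly those with i + j == 2*p - 1,
--     # so each odd-sum pair's mismatch count is computed once and every axis just
--     # reads its bucket.
--     diag = [0] * (2 * n)
--     for j in range(n):
--         for i in range(j):
--             if (i + j) % 2 == 1: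
--                 diag[i + j] += pair_diff(i, j)
--     return sum(p for p in range(1, n) if diag[2 * p - 1] == expected_diff)
--
-- def summarize_reflections(grids, expected_diff):
--     total = 0
--     for rows in grids:
--         n, w = len(rows), len(rows[0])
--         total += 100 * _axes_sum(n, lambda i, j: sum(a != b for a, b in zip(rows[i], rows[j])), expected_diff)
--         total += _axes_sum(w, lambda x1, x2: sum(r[x1] != r[x2] for r in rows), expected_diff)
--     return total
-- ===== Notes on version B (the rewrite author's own statement) =====
-- stated objective: alternative
-- what changed: B replaces A's per-axis outward mirror scan over the grid and its explicitly built transpose by a pair-sum histogram: every index pair (i,j) is visited once and its mismatch count added to bucket i+j, an axis at p then just reads bucket 2p-1; columns are addressed directly via rows[y][x] with no transposition, and the score is a filtered sum instead of A's exception-driven uniqueness tracker.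
import Mathlib
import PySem

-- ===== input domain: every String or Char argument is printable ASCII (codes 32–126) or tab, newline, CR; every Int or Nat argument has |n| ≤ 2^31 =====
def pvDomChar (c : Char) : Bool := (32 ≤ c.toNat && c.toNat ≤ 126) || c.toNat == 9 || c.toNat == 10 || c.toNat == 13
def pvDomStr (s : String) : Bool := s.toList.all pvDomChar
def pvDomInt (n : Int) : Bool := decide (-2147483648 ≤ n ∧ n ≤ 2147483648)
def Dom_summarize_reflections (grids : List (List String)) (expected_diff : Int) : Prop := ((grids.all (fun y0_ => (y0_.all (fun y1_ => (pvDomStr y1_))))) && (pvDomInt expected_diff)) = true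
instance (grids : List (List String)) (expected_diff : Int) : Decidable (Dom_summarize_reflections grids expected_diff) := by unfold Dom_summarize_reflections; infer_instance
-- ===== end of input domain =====

-- B replaces A's per-axis mirror scan over grid + built transpose by a pair-sum histogram
-- (bucket i+j collects each pair's mismatch count once; axis p reads bucket 2p-1; columns
-- are addressed directly, no transposition). (objective: alternative)


-- ===== PORT A =====
-- Python strings are indexed characterwise: both ports work over `String.toList` (exact).
-- Python exceptions (IndexError from indexing, A's two bare `raise`s) are modelled by `none`;
-- the final `.getD 0` only fills the exception case, which Pre_ excludes.

-- rows_diff(a, b)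
def rowsDiffA (a b : List Char) : Option Int :=
  (PySem.List.pyRange 0 (a.length : Int) 1).foldlM
    (fun diff i =>
      (PySem.List.pyGet? a i).bind fun ca =>
      (PySem.List.pyGet? b i).map fun cb =>
      if ca ≠ cb then diff + 1 else diff)
    (0 : Int)

-- transpose_grid(rows)
def transposeA (rows : List (List Char)) : Option (List (List Char)) :=
  (PySem.List.pyGet? rows 0).bind fun r0 =>
  (PySem.List.pyRange 0 (rows.length : Int) 1).foldlM
    (fun cols y =>
      (PySem.List.pyRange 0 (r0.length : Int) 1).foldlM
        (fun cols x =>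
          (PySem.List.pyGet? cols x).bind fun cur =>
          (PySem.List.pyGet? rows y).bind fun row =>
          (PySem.List.pyGet? row x).bind fun c =>
          PySem.List.pySet? cols x (cur ++ [c]))
        cols)
    (List.replicate r0.length ([] : List Char))

-- find_reflection(rows, expected_diff)
def findReflectionA (rows : List (List Char)) (expected_diff : Int) : Option (Option Int) :=
  (PySem.List.pyRange 1 (rows.length : Int) 1).foldlM
    (fun reflection start_pos =>
      let pos_pairs :=
        (PySem.List.pyRange 0 (min start_pos ((rows.length : Int) - start_pos)) 1).foldl
          (fun ps offset => ps ++ [(start_pos - 1 - offset, start_pos + offset)]) []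
      (pos_pairs.foldlM
        (fun total_diff ij =>
          (PySem.List.pyGet? rows ij.1).bind fun ra =>
          (PySem.List.pyGet? rows ij.2).bind fun rb =>
          (rowsDiffA ra rb).map fun d => total_diff + d)
        (0 : Int)).bind fun total_diff =>
      if total_diff = expected_diff then
        match reflection with
        | none => some (some start_pos)
        | some _ => none          -- raise "found more than one row/col reflection"
      else some reflection)
    (none : Option Int)

def summarize_reflections (grids : List (List String)) (expected_diff : Int) : Int :=
  (grids.foldlM
    (fun summary g =>
      let rows := g.map String.toList
      (transposeA rows).bind fun cols =>
      (findReflectionA cols expected_diff).bind fun cols_reflection =>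
      (findReflectionA rows expected_diff).bind fun rows_reflection =>
      if cols_reflection.isSome && rows_reflection.isSome then
        none                      -- raise "found both a col and a row reflection"
      else
        some (summary + (match cols_reflection with | some r => r | none => 0)
                      + (match rows_reflection with | some r => 100 * r | none => 0)))
    (0 : Int)).getD 0

-- ===== PORT B =====

-- lambda i, j: sum(a != b for a, b in zip(rows[i], rows[j]))
def pairRowDiffB (rows : List (List Char)) (i j : Int) : Option Int :=
  (PySem.List.pyGet? rows i).bind fun a =>
  (PySem.List.pyGet? rows j).map fun b =>
  ((a.zip b).map (fun q => if q.1 ≠ q.2 then (1 : Int) else 0)).sum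

-- lambda x1, x2: sum(r[x1] != r[x2] for r in rows)
def pairColDiffB (rows : List (List Char)) (x1 x2 : Int) : Option Int :=
  rows.foldlM
    (fun acc r =>
      (PySem.List.pyGet? r x1).bind fun c1 =>
      (PySem.List.pyGet? r x2).map fun c2 =>
      acc + if c1 ≠ c2 then 1 else 0)
    (0 : Int)

-- _axes_sum(n, pair_diff, expected_diff)  (diag[2*p-1] in the final sum is always in
-- range: 1 ≤ p ≤ n-1 gives 1 ≤ 2p-1 ≤ 2n-3 < 2n, so the total pyGetD read is exact)
def axesSumB (n : Nat) (pairDiff : Int → Int → Option Int) (expected_diff : Int) : Option Int :=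
  ((PySem.List.pyRange 0 (n : Int) 1).foldlM
    (fun diag j =>
      (PySem.List.pyRange 0 j 1).foldlM
        (fun diag i =>
          if PySem.Int.mod (i + j) 2 = 1 then
            (PySem.List.pyGet? diag (i + j)).bind fun cur =>
            (pairDiff i j).bind fun d =>
            PySem.List.pySet? diag (i + j) (cur + d)
          else some diag)
        diag)
    (List.replicate (2 * n) (0 : Int))).map
    (fun diag =>
      ((PySem.List.pyRange 1 (n : Int) 1).filter
        (fun p => PySem.List.pyGetD diag (2 * p - 1) 0 == expected_diff)).sum)

def summarize_reflections_alt (grids : List (List String)) (expected_diff : Int) : Int :=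
  (grids.foldlM
    (fun total g =>
      let rows := g.map String.toList
      (PySem.List.pyGet? rows 0).bind fun r0 =>
      (axesSumB rows.length (pairRowDiffB rows) expected_diff).bind fun rsum =>
      (axesSumB r0.length (pairColDiffB rows) expected_diff).map fun csum =>
      total + 100 * rsum + csum)
    (0 : Int)).getD 0

-- ===== PRECONDITION & SPEC =====

-- spec-level mirror bookkeeping (independent of both ports)
def pvHam (a b : List Char) : Nat := (a.zip b).countP (fun q => decide (q.1 ≠ q.2))

def pvPairD (rows : List (List Char)) (i j : Nat) : Int :=
  (pvHam (rows.getD i []) (rows.getD j []) : Int)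

def pvMirror (rows : List (List Char)) (p : Nat) : Int :=
  ((List.range (min p (rows.length - p))).map (fun o => pvPairD rows (p - 1 - o) (p + o))).sum

def pvAxes (rows : List (List Char)) (expected_diff : Int) : List Nat :=
  (List.range' 1 (rows.length - 1)).filter (fun p => pvMirror rows p == expected_diff)

def pvCols (rows : List (List Char)) : List (List Char) :=
  (List.range (rows.getD 0 []).length).map (fun x => rows.map (fun r => r.getD x ' '))

-- Pre_ is exactly A's no-exception domain: each grid is nonempty, no row is shorter than
-- the first row (else transpose raises IndexError), every mirrored pair of rows (i < j with
-- i + j odd) is length-monotone (else rows_diff raises IndexError), and the grid has at most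
-- one reflection axis over both orientations together (a second one hits A's explicit raise).
def Pre_summarize_reflections (grids : List (List String)) (expected_diff : Int) : Prop :=
  ∀ g ∈ grids,
    g ≠ [] ∧
    (∀ s ∈ g, (g.headI).toList.length ≤ s.toList.length) ∧
    (∀ j, j < g.length → ∀ i, i < j → (i + j) % 2 = 1 →
        (g.getD i "").toList.length ≤ (g.getD j "").toList.length) ∧
    (pvAxes (g.map String.toList) expected_diff).length
      + (pvAxes (pvCols (g.map String.toList)) expected_diff).length ≤ 1

instance (grids : List (List String)) (expected_diff : Int) : Decidable (Pre_summarize_reflections grids expected_diff) := by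
  unfold Pre_summarize_reflections; infer_instance

def pvWitness_summarize_reflections : List (List String) × Int := ([["#.", "#.", "##"]], 0)

def Spec_summarize_reflections (grids : List (List String)) (expected_diff : Int) (out : Int) : Prop := out = summarize_reflections_alt grids expected_diff
instance (grids : List (List String)) (expected_diff : Int) (out : Int) : Decidable (Spec_summarize_reflections grids expected_diff out) := by unfold Spec_summarize_reflections; infer_instance

-- ===== CLAIM (what is proved, stated in full; the proofs are below) =====
def Claim_equal_summarize_reflections : Prop := ∀ (grids : List (List String)) (expected_diff : Int), Dom_summarize_reflections grids expected_diff → Pre_summarize_reflections grids expected_diff → Spec_summarize_reflections grids expected_diff (summarize_reflections grids expected_diff)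

-- ===== LEMMAS AND PROOFS =====

-- generic Option-fold tools
theorem optFoldlM_eq_some {α β : Type} (l : List α) (F : β → α → Option β) (g : β → α → β)
    (h : ∀ acc, ∀ x ∈ l, F acc x = some (g acc x)) (init : β) :
    l.foldlM F init = some (l.foldl g init) := by
  induction l generalizing init with
  | nil => rfl
  | cons x t ih =>
    rw [List.foldlM_cons, h init x (by simp), List.foldl_cons]
    exact ih (fun acc y hy => h acc y (by simp [hy])) _

theorem optFoldlM_congr {α β : Type} (l : List α) (F G : β → α → Option β)
    (h : ∀ acc, ∀ x ∈ l, F acc x = G acc x) (init : β) :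
    l.foldlM F init = l.foldlM G init := by
  induction l generalizing init with
  | nil => rfl
  | cons x t ih =>
    rw [List.foldlM_cons, List.foldlM_cons, h init x (by simp)]
    cases G init x with
    | none => rfl
    | some b => exact ih (fun acc y hy => h acc y (by simp [hy])) b

theorem set_map_range {α : Type} (L k : Nat) (f : Nat → α) (v : α) :
    ((List.range L).map f).set k v = (List.range L).map (fun s => if s = k then v else f s) := by
  apply List.ext_getElem
  · simp
  · intro i h1 h2
    have hi : i < L := by simpa using h2
    rw [List.getElem_set]
    simp only [List.getElem_map, List.getElem_range]
    by_cases hik : k = i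
    · rw [if_pos hik, if_pos hik.symm]
    · rw [if_neg hik, if_neg (fun h : i = k => hik h.symm)]

-- sum over a range with at most one index satisfying i + j = s
theorem sum_ite_single (m j s : Nat) (d : Nat → Int) :
    ((List.range m).map (fun i => if i + j = s then d i else 0)).sum
      = if j ≤ s ∧ s - j < m then d (s - j) else 0 := by
  induction m with
  | zero => simp only [List.range_zero, List.map_nil, List.sum_nil]; rw [if_neg (by omega)]
  | succ m ih =>
    rw [List.range_succ, List.map_append, List.sum_append, ih]
    simp only [List.map_cons, List.map_nil, List.sum_cons, List.sum_nil]
    by_cases h1 : m + j = s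
    · rw [if_pos h1, if_neg (by omega), if_pos (by omega)]
      have hsj : s - j = m := by omega
      rw [hsj]; ring
    · rw [if_neg h1]
      by_cases h2 : j ≤ s ∧ s - j < m
      · rw [if_pos h2, if_pos (by omega)]; ring
      · rw [if_neg h2, if_neg (by omega)]; ring

-- a window sum extracted from a guarded range sum
theorem sum_window (n a b : Nat) (f : Nat → Int) :
    ((List.range n).map (fun j => if a ≤ j ∧ j ≤ b then f j else 0)).sum
      = ((List.range (min (b + 1) n - a)).map (fun o => f (a + o))).sum := by
  induction n with
  | zero => simp only [List.range_zero, List.map_nil, List.sum_nil]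
            have : min (b + 1) 0 - a = 0 := by omega
            rw [this]; simp
  | succ n ih =>
    rw [List.range_succ, List.map_append, List.sum_append, ih]
    simp only [List.map_cons, List.map_nil, List.sum_cons, List.sum_nil]
    by_cases h : a ≤ n ∧ n ≤ b
    · rw [if_pos h]
      have hm : min (b + 1) (n + 1) - a = (min (b + 1) n - a) + 1 := by omega
      rw [hm, List.range_succ, List.map_append, List.sum_append]
      simp only [List.map_cons, List.map_nil, List.sum_cons, List.sum_nil]
      have hx : a + (min (b + 1) n - a) = n := by omega
      rw [hx]
    · rw [if_neg h]
      have hm : min (b + 1) (n + 1) - a = min (b + 1) n - a := by omega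
      rw [hm]; ring

-- counting mismatches by index equals counting over the zip
theorem count_range_eq_ham (a b : List Char) (h : a.length ≤ b.length) :
    (List.range a.length).countP (fun k => decide (a.getD k ' ' ≠ b.getD k ' ')) = pvHam a b := by
  induction a generalizing b with
  | nil => simp [pvHam]
  | cons x a' ih =>
    cases b with
    | nil => simp at h
    | cons y b' =>
      simp only [List.length_cons] at h
      have h' : a'.length ≤ b'.length := by omega
      simp only [List.length_cons, List.range_succ_eq_map, List.countP_cons, List.countP_map,
        pvHam, List.zip_cons_cons]
      have hc : List.countP ((fun k => decide ((x :: a').getD k ' ' ≠ (y :: b').getD k ' ')) ∘ Nat.succ)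
          (List.range a'.length)
          = List.countP (fun k => decide (a'.getD k ' ' ≠ b'.getD k ' ')) (List.range a'.length) := by
        apply List.countP_congr
        intro k _
        simp
      rw [hc, ih b' h']
      simp [pvHam]

-- rows_diff returns the zip mismatch count whenever the first row is not longer
theorem rowsDiffA_eq (a b : List Char) (h : a.length ≤ b.length) :
    rowsDiffA a b = some (pvHam a b : Int) := by
  unfold rowsDiffA
  rw [PySem.List.pyRange_one]
  simp only [sub_zero, Int.toNat_natCast]
  rw [List.foldlM_map]
  rw [optFoldlM_eq_some _ _
    (fun diff k => if a.getD k ' ' ≠ b.getD k ' ' then diff + 1 else diff) ?_ 0]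
  · rw [PySem.List.foldl_ite_add_one, count_range_eq_ham a b h, zero_add]
  · intro acc k hk
    simp only [List.mem_range] at hk
    have hb : k < b.length := lt_of_lt_of_le hk h
    simp only [zero_add, PySem.List.pyGet?_natCast, List.getElem?_eq_getElem hk,
      List.getElem?_eq_getElem hb, Option.bind_some, Option.map_some]
    rw [List.getD_eq_getElem a ' ' hk, List.getD_eq_getElem b ' ' hb]


-- Option-monad plumbing (definitional, stated once for rewriting)
theorem pvBindSome {α β : Type} (a : α) (f : α → Option β) : (some a >>= f) = f a := rfl

theorem optFoldlM_append_some {α β : Type} (l1 l2 : List α) (F : β → α → Option β)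
    (init s : β) (h1 : l1.foldlM F init = some s) :
    (l1 ++ l2).foldlM F init = l2.foldlM F s := by
  rw [List.foldlM_append, h1]; rfl

theorem optFoldlM_singleton {α β : Type} (F : β → α → Option β) (s : β) (a : α) :
    [a].foldlM F s = F s a := by
  cases h : F s a <;> simp [List.foldlM_cons, List.foldlM_nil, h]

theorem replicate_eq_map {α : Type} (w : Nat) (v : α) :
    List.replicate w v = (List.range w).map (fun _ => v) := by
  apply List.ext_getElem <;> simp

theorem getD_toList_map (g : List String) (i : Nat) :
    (g.map String.toList).getD i [] = (g.getD i "").toList := by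
  by_cases hi : i < g.length
  · rw [List.getD_eq_getElem _ _ (by simpa using hi), List.getD_eq_getElem _ _ hi,
      List.getElem_map]
  · rw [List.getD_eq_default _ _ (by simpa using Nat.le_of_not_lt hi),
      List.getD_eq_default _ _ (Nat.le_of_not_lt hi)]
    rfl

-- transpose: the inner loop appends row y's character to each of the first m columns
theorem transposeA_inner (rows : List (List Char)) (y : Nat) (row : List Char)
    (hy : PySem.List.pyGet? rows (y : Int) = some row) (w : Nat) (hwr : w ≤ row.length)
    (colf : Nat → List Char) :
    ∀ m, m ≤ w →
    (PySem.List.pyRange 0 (m : Int) 1).foldlM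
      (fun cols x =>
        (PySem.List.pyGet? cols x).bind fun cur =>
        (PySem.List.pyGet? rows (y : Int)).bind fun rowv =>
        (PySem.List.pyGet? rowv x).bind fun c =>
        PySem.List.pySet? cols x (cur ++ [c]))
      ((List.range w).map colf)
    = some ((List.range w).map (fun x => if x < m then colf x ++ [row.getD x ' '] else colf x)) := by
  intro m
  induction m with
  | zero =>
    intro _
    simp only [Nat.cast_zero, PySem.List.pyRange_one_eq_nil (le_refl 0), List.foldlM_nil,
      Option.pure_def, Option.some.injEq]
    apply List.map_congr_left
    intro x _
    rw [if_neg (by omega)]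
  | succ m ih =>
    intro hm1
    have hm : m ≤ w := by omega
    have hmw : m < w := hm1
    have hcast : ((m + 1 : Nat) : Int) = (m : Int) + 1 := by push_cast; ring
    rw [hcast, PySem.List.pyRange_one_succ_right (by omega),
      optFoldlM_append_some _ _ _ _ _ (ih hm), optFoldlM_singleton]
    have hget : PySem.List.pyGet?
        ((List.range w).map (fun x => if x < m then colf x ++ [row.getD x ' '] else colf x))
        ((m : Nat) : Int) = some (colf m) := by
      rw [PySem.List.pyGet?_natCast, List.getElem?_eq_getElem (by simpa using hmw)]
      simp only [List.getElem_map, List.getElem_range]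
      rw [if_neg (by omega)]
    have hrow : PySem.List.pyGet? row ((m : Nat) : Int) = some (row.getD m ' ') := by
      have hmr : m < row.length := lt_of_lt_of_le hmw hwr
      rw [PySem.List.pyGet?_natCast, List.getElem?_eq_getElem hmr,
        List.getD_eq_getElem row ' ' hmr]
    rw [hget, Option.bind_some, hy, Option.bind_some, hrow, Option.bind_some,
      PySem.List.pySet?_natCast _ _ _ (by simpa using hmw), set_map_range]
    congr 1
    apply List.map_congr_left
    intro s hs
    split_ifs with h1 h2
    · subst h1; rfl
    · exfalso; omega
    · rfl
    · exfalso; omega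
    · exfalso; omega
    · rfl

theorem transposeA_outer (rows : List (List Char)) (w : Nat)
    (hw : ∀ r ∈ rows, w ≤ r.length) :
    ∀ k, k ≤ rows.length →
    (PySem.List.pyRange 0 (k : Int) 1).foldlM
      (fun cols y =>
        (PySem.List.pyRange 0 (w : Int) 1).foldlM
          (fun cols x =>
            (PySem.List.pyGet? cols x).bind fun cur =>
            (PySem.List.pyGet? rows y).bind fun rowv =>
            (PySem.List.pyGet? rowv x).bind fun c =>
            PySem.List.pySet? cols x (cur ++ [c]))
          cols)
      (List.replicate w ([] : List Char))
    = some ((List.range w).map (fun x => (rows.take k).map (fun r => r.getD x ' '))) := by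
  intro k
  induction k with
  | zero =>
    intro _
    rw [Nat.cast_zero, PySem.List.pyRange_one_eq_nil (le_refl 0), List.foldlM_nil,
      replicate_eq_map]
    rfl
  | succ k ih =>
    intro hk1
    have hk : k < rows.length := hk1
    have hcast : ((k + 1 : Nat) : Int) = (k : Int) + 1 := by push_cast; ring
    rw [hcast, PySem.List.pyRange_one_succ_right (by omega),
      optFoldlM_append_some _ _ _ _ _ (ih (by omega)), optFoldlM_singleton]
    have hy : PySem.List.pyGet? rows ((k : Nat) : Int) = some (rows.getD k []) := by
      rw [PySem.List.pyGet?_natCast, List.getElem?_eq_getElem hk,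
        List.getD_eq_getElem rows [] hk]
    have hwr : w ≤ (rows.getD k []).length := by
      apply hw
      rw [List.getD_eq_getElem rows [] hk]
      exact List.getElem_mem hk
    rw [transposeA_inner rows k (rows.getD k []) hy w hwr _ w (le_refl w)]
    congr 1
    apply List.map_congr_left
    intro x hx
    have hxw : x < w := by simpa using hx
    rw [if_pos hxw, List.take_add_one, List.map_append, List.getElem?_eq_getElem hk]
    simp only [Option.toList_some, List.map_cons, List.map_nil]
    rw [List.getD_eq_getElem rows [] hk]

-- transpose_grid builds exactly the spec columns
theorem transposeA_eq (rows : List (List Char)) (hne : rows ≠ [])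
    (hw : ∀ r ∈ rows, (rows.getD 0 []).length ≤ r.length) :
    transposeA rows = some (pvCols rows) := by
  have hlen0 : 0 < rows.length := List.length_pos_iff.mpr hne
  have h0 : PySem.List.pyGet? rows 0 = some (rows.getD 0 []) := by
    rw [PySem.List.pyGet?_zero, List.getElem?_eq_getElem hlen0,
      List.getD_eq_getElem rows [] hlen0]
  unfold transposeA
  rw [h0, Option.bind_some,
    transposeA_outer rows (rows.getD 0 []).length hw rows.length (le_refl _),
    List.take_length]
  rfl

-- find_reflection returns the head of the axis list when there is at most one axis
theorem findFold {α : Type} (q : α → Bool) (f : α → Int) :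
    ∀ (L : List α) (refl : Option Int),
    L.foldlM (fun r p => if q p then
        (match r with | none => some (some (f p)) | some _ => none) else some r) refl
    = (match refl with
       | some r => if L.filter q = [] then some (some r) else none
       | none => (match L.filter q with
         | [] => some none
         | [p] => some (some (f p))
         | _ :: _ :: _ => none)) := by
  intro L
  induction L with
  | nil => intro refl; cases refl <;> rfl
  | cons x t ih =>
    intro refl
    rw [List.foldlM_cons]
    by_cases hq : q x
    · cases refl with
      | some r =>
        rw [if_pos hq, List.filter_cons_of_pos hq]
        rfl
      | none =>
        rw [if_pos hq, pvBindSome, ih (some (f x)), List.filter_cons_of_pos hq]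
        cases htf : t.filter q with
        | nil => rfl
        | cons a t' => rfl
    · rw [if_neg hq, pvBindSome, ih refl, List.filter_cons_of_neg hq]

theorem findReflectionA_eq (rows : List (List Char)) (ed : Int)
    (hlen : ∀ j, j < rows.length → ∀ i, i < j → (i + j) % 2 = 1 →
        (rows.getD i []).length ≤ (rows.getD j []).length)
    (hax : (pvAxes rows ed).length ≤ 1) :
    findReflectionA rows ed = some ((pvAxes rows ed).head?.map (fun p : Nat => (p : Int))) := by
  unfold findReflectionA
  rw [PySem.List.pyRange_one]
  have hn1 : ((rows.length : Int) - 1).toNat = rows.length - 1 := by omega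
  rw [hn1, List.foldlM_map]
  rw [optFoldlM_congr _ _
    (fun r k => if (pvMirror rows (1 + k) == ed) then
        (match r with | none => some (some ((1 : Int) + (k : Int))) | some _ => none)
      else some r) ?_ none]
  · rw [findFold]
    have haxes : pvAxes rows ed
        = ((List.range (rows.length - 1)).filter
            (fun k => pvMirror rows (1 + k) == ed)).map (fun k => 1 + k) := by
      rw [pvAxes, List.range'_eq_map_range, List.filter_map]
      rfl
    rw [haxes] at hax ⊢
    cases hfq : (List.range (rows.length - 1)).filter (fun k => pvMirror rows (1 + k) == ed) with
    | nil => rfl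
    | cons a t =>
      cases t with
      | nil => simp
      | cons b t' => rw [hfq] at hax; simp at hax
  · intro refl k hk
    have hkn : k < rows.length - 1 := by simpa using hk
    have htot : ((PySem.List.pyRange 0
          (min ((1 : Int) + (k : Int)) ((rows.length : Int) - (1 + (k : Int)))) 1).foldl
          (fun ps offset => ps ++ [((1 : Int) + (k : Int) - 1 - offset, (1 : Int) + (k : Int) + offset)]) []).foldlM
        (fun total_diff ij =>
          (PySem.List.pyGet? rows ij.1).bind fun ra =>
          (PySem.List.pyGet? rows ij.2).bind fun rb =>
          (rowsDiffA ra rb).map fun d => total_diff + d)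
        (0 : Int) = some (pvMirror rows (1 + k)) := by
      have hmin : min ((1 : Int) + (k : Int)) ((rows.length : Int) - (1 + (k : Int)))
          = ((min (1 + k) (rows.length - (1 + k)) : Nat) : Int) := by push_cast; omega
      rw [hmin, PySem.List.pyRange_one]
      have htn : (((min (1 + k) (rows.length - (1 + k)) : Nat) : Int) - 0).toNat
          = min (1 + k) (rows.length - (1 + k)) := by omega
      rw [htn, PySem.List.foldl_append_singleton_eq_map, List.nil_append, List.map_map,
        List.foldlM_map]
      rw [optFoldlM_eq_some _ _ (fun td o => td + pvPairD rows (k - o) (1 + k + o)) ?_ 0]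
      · rw [PySem.List.foldl_add, zero_add, pvMirror]
        congr 2
        apply List.map_congr_left
        intro o _
        have hoo : 1 + k - 1 - o = k - o := by omega
        rw [hoo]
      · intro acc o ho
        have hom : o < min (1 + k) (rows.length - (1 + k)) := by simpa using ho
        have hio : ((1 : Int) + (k : Int) - 1 - (0 + (o : Int))) = ((k - o : Nat) : Int) := by
          omega
        have hjo : ((1 : Int) + (k : Int) + (0 + (o : Int))) = ((1 + k + o : Nat) : Int) := by
          push_cast; ring
        simp only [Function.comp_apply, hio, hjo]
        have hkon : k - o < rows.length := by omega
        have hjon : 1 + k + o < rows.length := by omega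
        rw [PySem.List.pyGet?_natCast, List.getElem?_eq_getElem hkon, Option.bind_some,
          PySem.List.pyGet?_natCast, List.getElem?_eq_getElem hjon, Option.bind_some,
          ← List.getD_eq_getElem rows [] hkon, ← List.getD_eq_getElem rows [] hjon,
          rowsDiffA_eq _ _ (hlen (1 + k + o) hjon (k - o) (by omega) (by omega)),
          Option.map_some, pvPairD]
    simp only [htot, Option.bind_some]
    by_cases hqq : pvMirror rows (1 + k) = ed
    · rw [if_pos hqq, if_pos (by simpa using hqq)]
    · rw [if_neg hqq, if_neg (by simpa using hqq)]

-- the B-side histogram: bucket 2p-1 equals the mirror mismatch count at axis p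
def pvSInt (L : List Nat) : Int := (L.map (fun p : Nat => (p : Int))).sum

theorem axesInnerB (pairDiff : Int → Int → Option Int) (rowsS : List (List Char))
    (L j : Nat) (hpd : ∀ i : Nat, i < j → pairDiff (i : Int) (j : Int) = some (pvPairD rowsS i j))
    (hjL : j + j ≤ L) (f : Nat → Int) :
    ∀ m, m ≤ j →
    (PySem.List.pyRange 0 (m : Int) 1).foldlM
      (fun diag i =>
        if PySem.Int.mod (i + (j : Int)) 2 = 1 then
          (PySem.List.pyGet? diag (i + (j : Int))).bind fun cur =>
          (pairDiff i (j : Int)).bind fun d =>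
          PySem.List.pySet? diag (i + (j : Int)) (cur + d)
        else some diag)
      ((List.range L).map f)
    = some ((List.range L).map (fun s =>
        f s + ((List.range m).map (fun i => if (i + j) % 2 = 1 ∧ i + j = s then pvPairD rowsS i j else 0)).sum)) := by
  intro m
  induction m with
  | zero =>
    simp only [Nat.cast_zero, PySem.List.pyRange_one_eq_nil (le_refl 0), List.foldlM_nil,
      Option.pure_def, Option.some.injEq]
    intro _
    apply List.map_congr_left
    intro s _
    simp
  | succ m ih =>
    intro hm1
    have hm : m ≤ j := by omega
    have hmj : m + j < L := by omega
    have hcast : ((m + 1 : Nat) : Int) = (m : Int) + 1 := by push_cast; ring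
    rw [hcast, PySem.List.pyRange_one_succ_right (by omega),
      optFoldlM_append_some _ _ _ _ _ (ih hm), optFoldlM_singleton]
    have hc : ((m : Int) + (j : Int)) = ((m + j : Nat) : Int) := by push_cast; ring
    rw [hc]
    have hgg : PySem.Int.mod (((m + j : Nat) : Int)) 2 = 1 ↔ (m + j) % 2 = 1 := by
      rw [PySem.Int.mod_eq_emod_of_pos (by norm_num)]
      omega
    by_cases hpar : (m + j) % 2 = 1
    · rw [if_pos (hgg.mpr hpar)]
      have hget : PySem.List.pyGet?
          ((List.range L).map (fun s =>
            f s + ((List.range m).map (fun i => if (i + j) % 2 = 1 ∧ i + j = s then pvPairD rowsS i j else 0)).sum))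
          ((m + j : Nat) : Int)
          = some (f (m + j)
              + ((List.range m).map
                  (fun i => if (i + j) % 2 = 1 ∧ i + j = m + j then pvPairD rowsS i j else 0)).sum) := by
        rw [PySem.List.pyGet?_natCast, List.getElem?_eq_getElem (by simpa using hmj)]
        simp only [List.getElem_map, List.getElem_range]
      rw [hget, Option.bind_some, hpd m hm1, Option.bind_some,
        PySem.List.pySet?_natCast _ _ _ (by simpa using hmj), set_map_range]
      congr 1
      apply List.map_congr_left
      intro s _
      rw [List.range_succ, List.map_append, List.sum_append]
      simp only [List.map_cons, List.map_nil, List.sum_cons, List.sum_nil]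
      by_cases hsm : s = m + j
      · rw [if_pos hsm, if_pos (by exact ⟨by omega, by omega⟩)]
        subst hsm
        ring
      · rw [if_neg hsm, if_neg (by intro hcon; omega)]
        ring
    · rw [if_neg (fun hx => hpar (hgg.mp hx))]
      congr 1
      apply List.map_congr_left
      intro s _
      rw [List.range_succ, List.map_append, List.sum_append]
      simp only [List.map_cons, List.map_nil, List.sum_cons, List.sum_nil]
      rw [if_neg (by intro hcon; omega)]
      ring

theorem axesOuterB (pairDiff : Int → Int → Option Int) (rowsS : List (List Char)) (n : Nat)
    (hpd : ∀ i j : Nat, i < j → j < n → pairDiff (i : Int) (j : Int) = some (pvPairD rowsS i j)) :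
    ∀ K, K ≤ n →
    (PySem.List.pyRange 0 (K : Int) 1).foldlM
      (fun diag j =>
        (PySem.List.pyRange 0 j 1).foldlM
          (fun diag i =>
            if PySem.Int.mod (i + j) 2 = 1 then
              (PySem.List.pyGet? diag (i + j)).bind fun cur =>
              (pairDiff i j).bind fun d =>
              PySem.List.pySet? diag (i + j) (cur + d)
            else some diag)
          diag)
      (List.replicate (2 * n) (0 : Int))
    = some ((List.range (2 * n)).map (fun s =>
        ((List.range K).map (fun j =>
          ((List.range j).map (fun i => if (i + j) % 2 = 1 ∧ i + j = s then pvPairD rowsS i j else 0)).sum)).sum)) := by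
  intro K
  induction K with
  | zero =>
    simp only [Nat.cast_zero, PySem.List.pyRange_one_eq_nil (le_refl 0), List.foldlM_nil,
      Option.pure_def, Option.some.injEq, replicate_eq_map]
    intro _
    apply List.map_congr_left
    intro s _
    simp
  | succ K ih =>
    intro hK1
    have hK : K < n := hK1
    have hcast : ((K + 1 : Nat) : Int) = (K : Int) + 1 := by push_cast; ring
    rw [hcast, PySem.List.pyRange_one_succ_right (by omega),
      optFoldlM_append_some _ _ _ _ _ (ih (by omega)), optFoldlM_singleton,
      axesInnerB pairDiff rowsS (2 * n) K (fun i hi => hpd i K hi hK) (by omega) _ K (le_refl K)]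
    congr 1
    apply List.map_congr_left
    intro s _
    rw [List.range_succ, List.map_append, List.sum_append]
    simp

theorem bucket_odd (rowsS : List (List Char)) (n p : Nat) (hn : rowsS.length = n)
    (hp1 : 1 ≤ p) (hpn : p < n) :
    ((List.range (2 * n)).map (fun s =>
        ((List.range n).map (fun j =>
          ((List.range j).map (fun i => if (i + j) % 2 = 1 ∧ i + j = s then pvPairD rowsS i j else 0)).sum)).sum)).getD
        (2 * p - 1) 0
      = pvMirror rowsS p := by
  rw [PySem.List.getD_map_range _ _ _ _ (by omega)]
  have hinner : ∀ j : Nat, ((List.range j).map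
        (fun i => if (i + j) % 2 = 1 ∧ i + j = 2 * p - 1 then pvPairD rowsS i j else 0)).sum
      = if p ≤ j ∧ j ≤ 2 * p - 1 then pvPairD rowsS (2 * p - 1 - j) j else 0 := by
    intro j
    have hconv : ((List.range j).map
          (fun i => if (i + j) % 2 = 1 ∧ i + j = 2 * p - 1 then pvPairD rowsS i j else 0)).sum
        = ((List.range j).map
          (fun i => if i + j = 2 * p - 1 then pvPairD rowsS i j else 0)).sum := by
      congr 1
      apply List.map_congr_left
      intro i _
      by_cases hij : i + j = 2 * p - 1
      · rw [if_pos ⟨by omega, hij⟩, if_pos hij]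
      · rw [if_neg (by intro hcon; omega), if_neg hij]
    rw [hconv, sum_ite_single j j (2 * p - 1) (fun i => pvPairD rowsS i j)]
    by_cases hc : p ≤ j ∧ j ≤ 2 * p - 1
    · rw [if_pos (by omega), if_pos hc]
    · rw [if_neg (by omega), if_neg hc]
  calc ((List.range n).map (fun j =>
          ((List.range j).map
            (fun i => if (i + j) % 2 = 1 ∧ i + j = 2 * p - 1 then pvPairD rowsS i j else 0)).sum)).sum
      = ((List.range n).map (fun j =>
          if p ≤ j ∧ j ≤ 2 * p - 1 then pvPairD rowsS (2 * p - 1 - j) j else 0)).sum := by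
        congr 1
        apply List.map_congr_left
        intro j _
        exact hinner j
    _ = ((List.range (min (2 * p - 1 + 1) n - p)).map
          (fun o => pvPairD rowsS (2 * p - 1 - (p + o)) (p + o))).sum := by
        exact sum_window n p (2 * p - 1) (fun j => pvPairD rowsS (2 * p - 1 - j) j)
    _ = pvMirror rowsS p := by
        rw [pvMirror, hn]
        have hmm : min (2 * p - 1 + 1) n - p = min p (n - p) := by omega
        rw [hmm]
        congr 1
        apply List.map_congr_left
        intro o ho
        have hol : o < min p (n - p) := by simpa using ho
        have h1 : 2 * p - 1 - (p + o) = p - 1 - o := by omega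
        rw [h1]

theorem axesSumB_eq (n : Nat) (pairDiff : Int → Int → Option Int) (rowsS : List (List Char))
    (ed : Int) (hn : rowsS.length = n)
    (hpd : ∀ i j : Nat, i < j → j < n → pairDiff (i : Int) (j : Int) = some (pvPairD rowsS i j)) :
    axesSumB n pairDiff ed = some (pvSInt (pvAxes rowsS ed)) := by
  unfold axesSumB
  rw [axesOuterB pairDiff rowsS n hpd n (le_refl n), Option.map_some]
  congr 1
  rw [PySem.List.pyRange_one]
  have hn1 : (((n : Nat) : Int) - 1).toNat = n - 1 := by omega
  rw [hn1, List.filter_map]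
  have hfc : ((List.range (n - 1)).filter
        ((fun p => PySem.List.pyGetD ((List.range (2 * n)).map (fun s =>
            ((List.range n).map (fun j =>
              ((List.range j).map (fun i => if (i + j) % 2 = 1 ∧ i + j = s then pvPairD rowsS i j else 0)).sum)).sum))
          (2 * p - 1) 0 == ed) ∘ (fun k => (1 : Int) + (k : Nat))))
      = (List.range (n - 1)).filter (fun k => pvMirror rowsS (1 + k) == ed) := by
    apply List.filter_congr
    intro k hk
    have hkn : k < n - 1 := by simpa using hk
    simp only [Function.comp_apply]
    have hidx : (2 * ((1 : Int) + (k : Nat)) - 1) = ((2 * k + 1 : Nat) : Int) := by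
      push_cast; ring
    rw [hidx, PySem.List.pyGetD_natCast,
      show ((List.range (2 * n)).map (fun s =>
          ((List.range n).map (fun j =>
            ((List.range j).map (fun i => if (i + j) % 2 = 1 ∧ i + j = s then pvPairD rowsS i j else 0)).sum)).sum)).getD
          (2 * k + 1) 0 = pvMirror rowsS (1 + k) by
        have h21 : 2 * k + 1 = 2 * (1 + k) - 1 := by omega
        rw [h21]
        exact bucket_odd rowsS n (1 + k) hn (by omega) (by omega)]
  rw [hfc]
  have haxes : pvAxes rowsS ed
      = ((List.range (rowsS.length - 1)).filter
          (fun k => pvMirror rowsS (1 + k) == ed)).map (fun k => 1 + k) := by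
    rw [pvAxes, List.range'_eq_map_range, List.filter_map]
    rfl
  have hsum : ∀ (M : List Nat), (M.map (fun k : Nat => (1 : Int) + (k : Int))).sum
      = pvSInt (M.map (fun k => 1 + k)) := by
    intro M
    induction M with
    | nil => rfl
    | cons a t ih =>
      simp only [List.map_cons, pvSInt, List.sum_cons] at ih ⊢
      rw [ih]
      push_cast
      ring
  rw [haxes, hn]
  exact hsum _

-- per-grid values
def pvGridVal (rows : List (List Char)) (ed : Int) : Int :=
  100 * pvSInt (pvAxes rows ed) + pvSInt (pvAxes (pvCols rows) ed)

-- the two pair-diff lambdas of B meet axesSumB_eq's hypothesis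
theorem pairRowDiffB_eq (rows : List (List Char)) (i j : Nat) (hi : i < rows.length)
    (hj : j < rows.length) : pairRowDiffB rows (i : Int) (j : Int) = some (pvPairD rows i j) := by
  unfold pairRowDiffB
  simp only [PySem.List.pyGet?_natCast, List.getElem?_eq_getElem hi, List.getElem?_eq_getElem hj,
    Option.bind_some, Option.map_some]
  congr 1
  rw [pvPairD, List.getD_eq_getElem rows [] hi, List.getD_eq_getElem rows [] hj, pvHam,
    ← PySem.List.sum_map_ite_one_zero (fun q : Char × Char => decide (q.1 ≠ q.2))]
  congr 1
  apply List.map_congr_left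
  intro q _
  simp

theorem pairColDiffB_eq (rows : List (List Char)) (x1 x2 : Nat)
    (hw : ∀ r ∈ rows, (rows.getD 0 []).length ≤ r.length)
    (h1 : x1 < (rows.getD 0 []).length) (h2 : x2 < (rows.getD 0 []).length) :
    pairColDiffB rows (x1 : Int) (x2 : Int) = some (pvPairD (pvCols rows) x1 x2) := by
  unfold pairColDiffB
  rw [optFoldlM_eq_some _ _
    (fun acc r => acc + if r.getD x1 ' ' ≠ r.getD x2 ' ' then 1 else 0) ?_ 0]
  · congr 1
    rw [PySem.List.foldl_add, zero_add, pvPairD]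
    simp only [pvCols]
    rw [PySem.List.getD_map_range _ _ _ _ h1, PySem.List.getD_map_range _ _ _ _ h2]
    rw [pvHam, List.zip_map', List.countP_map]
    have hcp : List.countP ((fun q : Char × Char => decide (q.1 ≠ q.2))
          ∘ fun a : List Char => (a.getD x1 ' ', a.getD x2 ' ')) rows
        = List.countP (fun r : List Char => decide (r.getD x1 ' ' ≠ r.getD x2 ' ')) rows := by
      apply List.countP_congr
      intro r _
      simp [Function.comp]
    rw [hcp, ← PySem.List.sum_map_ite_one_zero
      (fun r : List Char => decide (r.getD x1 ' ' ≠ r.getD x2 ' '))]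
    congr 1
    apply List.map_congr_left
    intro r _
    simp
  · intro acc r hr
    have hlen := hw r hr
    have hx1 : x1 < r.length := lt_of_lt_of_le h1 hlen
    have hx2 : x2 < r.length := lt_of_lt_of_le h2 hlen
    simp only [PySem.List.pyGet?_natCast, List.getElem?_eq_getElem hx1,
      List.getElem?_eq_getElem hx2, Option.bind_some, Option.map_some]
    rw [List.getD_eq_getElem r ' ' hx1, List.getD_eq_getElem r ' ' hx2]

-- per-grid agreement
theorem headD_map_eq (g : List String) (h1 : g ≠ []) :
    (g.map String.toList).getD 0 [] = g.headI.toList := by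
  cases g with
  | nil => exact absurd rfl h1
  | cons a t => rfl

theorem hw_map (g : List String) (h1 : g ≠ [])
    (h2 : ∀ s ∈ g, (g.headI).toList.length ≤ s.toList.length) :
    ∀ r ∈ g.map String.toList, ((g.map String.toList).getD 0 []).length ≤ r.length := by
  intro r hr
  obtain ⟨s, hs, rfl⟩ := List.mem_map.mp hr
  rw [headD_map_eq g h1]
  exact h2 s hs

theorem gridA_eq (g : List String) (ed : Int) (h1 : g ≠ [])
    (h2 : ∀ s ∈ g, (g.headI).toList.length ≤ s.toList.length)
    (h3 : ∀ j, j < g.length → ∀ i, i < j → (i + j) % 2 = 1 →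
        (g.getD i "").toList.length ≤ (g.getD j "").toList.length)
    (h4 : (pvAxes (g.map String.toList) ed).length
        + (pvAxes (pvCols (g.map String.toList)) ed).length ≤ 1) (summary : Int) :
    ((transposeA (g.map String.toList)).bind fun cols =>
      (findReflectionA cols ed).bind fun cols_reflection =>
      (findReflectionA (g.map String.toList) ed).bind fun rows_reflection =>
      if cols_reflection.isSome && rows_reflection.isSome then none
      else
        some (summary + (match cols_reflection with | some r => r | none => 0)
                      + (match rows_reflection with | some r => 100 * r | none => 0)))
      = some (summary + pvGridVal (g.map String.toList) ed) := by
  have hgd := getD_toList_map g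
  have hne : g.map String.toList ≠ [] := by simpa using h1
  rw [transposeA_eq _ hne (hw_map g h1 h2), Option.bind_some]
  have hlenc : ∀ j, j < (pvCols (g.map String.toList)).length → ∀ i, i < j → (i + j) % 2 = 1 →
      ((pvCols (g.map String.toList)).getD i []).length
        ≤ ((pvCols (g.map String.toList)).getD j []).length := by
    intro j hjl i hij _
    have hw' : (pvCols (g.map String.toList)).length
        = ((g.map String.toList).getD 0 []).length := by simp [pvCols]
    rw [hw'] at hjl
    have hil : i < ((g.map String.toList).getD 0 []).length := by omega
    simp only [pvCols]
    rw [PySem.List.getD_map_range _ _ _ _ hil, PySem.List.getD_map_range _ _ _ _ hjl]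
    simp
  have haxc : (pvAxes (pvCols (g.map String.toList)) ed).length ≤ 1 := by omega
  have haxr : (pvAxes (g.map String.toList) ed).length ≤ 1 := by omega
  have hlenr : ∀ j, j < (g.map String.toList).length → ∀ i, i < j → (i + j) % 2 = 1 →
      ((g.map String.toList).getD i []).length ≤ ((g.map String.toList).getD j []).length := by
    intro j hjl i hij hpar
    rw [hgd i, hgd j]
    exact h3 j (by simpa using hjl) i hij hpar
  rw [findReflectionA_eq _ ed hlenc haxc, Option.bind_some,
    findReflectionA_eq _ ed hlenr haxr, Option.bind_some]
  have hcs : pvAxes (pvCols (g.map String.toList)) ed = [] ∨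
      ∃ pc, pvAxes (pvCols (g.map String.toList)) ed = [pc] := by
    cases hl : pvAxes (pvCols (g.map String.toList)) ed with
    | nil => exact Or.inl rfl
    | cons a t =>
      cases t with
      | nil => exact Or.inr ⟨a, rfl⟩
      | cons b t' => rw [hl] at haxc; simp at haxc
  have hrs : pvAxes (g.map String.toList) ed = [] ∨
      ∃ pr, pvAxes (g.map String.toList) ed = [pr] := by
    cases hl : pvAxes (g.map String.toList) ed with
    | nil => exact Or.inl rfl
    | cons a t =>
      cases t with
      | nil => exact Or.inr ⟨a, rfl⟩
      | cons b t' => rw [hl] at haxr; simp at haxr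
  rcases hcs with hc | ⟨pc, hc⟩ <;> rcases hrs with hr | ⟨pr, hr⟩
  · rw [hc, hr]
    simp [pvGridVal, pvSInt, hc, hr]
  · rw [hc, hr]
    simp [pvGridVal, pvSInt, hc, hr]
  · rw [hc, hr]
    simp [pvGridVal, pvSInt, hc, hr]
  · exfalso
    rw [hc, hr] at h4
    simp at h4

theorem gridB_eq (g : List String) (ed : Int) (h1 : g ≠ [])
    (h2 : ∀ s ∈ g, (g.headI).toList.length ≤ s.toList.length) (total : Int) :
    ((PySem.List.pyGet? (g.map String.toList) 0).bind fun r0 =>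
      (axesSumB (g.map String.toList).length (pairRowDiffB (g.map String.toList)) ed).bind fun rsum =>
      (axesSumB r0.length (pairColDiffB (g.map String.toList)) ed).map fun csum =>
      total + 100 * rsum + csum)
      = some (total + pvGridVal (g.map String.toList) ed) := by
  have hne : g.map String.toList ≠ [] := by simpa using h1
  have hlen0 : 0 < (g.map String.toList).length := List.length_pos_iff.mpr hne
  have h0 : PySem.List.pyGet? (g.map String.toList) 0
      = some ((g.map String.toList).getD 0 []) := by
    rw [PySem.List.pyGet?_zero, List.getElem?_eq_getElem hlen0, List.getD_eq_getElem _ [] hlen0]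
  rw [h0, Option.bind_some,
    axesSumB_eq (g.map String.toList).length (pairRowDiffB (g.map String.toList))
      (g.map String.toList) ed rfl
      (fun i j hij hj => pairRowDiffB_eq _ i j (lt_trans hij hj) hj),
    Option.bind_some,
    axesSumB_eq ((g.map String.toList).getD 0 []).length (pairColDiffB (g.map String.toList))
      (pvCols (g.map String.toList)) ed (by simp [pvCols])
      (fun x1 x2 h12 h2w => pairColDiffB_eq _ x1 x2 (hw_map g h1 h2) (lt_trans h12 h2w) h2w),
    Option.map_some, pvGridVal]
  congr 1
  ring

-- ===== VERDICT (by name: the statement is the Claim_ definition above) =====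
theorem summarize_reflections_spec : Claim_equal_summarize_reflections := by
  intro grids ed _hdom hpre
  unfold Spec_summarize_reflections summarize_reflections summarize_reflections_alt
  have hA : grids.foldlM
      (fun summary g =>
        let rows := g.map String.toList
        (transposeA rows).bind fun cols =>
        (findReflectionA cols ed).bind fun cols_reflection =>
        (findReflectionA rows ed).bind fun rows_reflection =>
        if cols_reflection.isSome && rows_reflection.isSome then none
        else
          some (summary + (match cols_reflection with | some r => r | none => 0)
                        + (match rows_reflection with | some r => 100 * r | none => 0)))
      (0 : Int) = some (grids.foldl (fun acc g => acc + pvGridVal (g.map String.toList) ed) 0) := by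
    apply optFoldlM_eq_some
    intro acc g hg
    obtain ⟨c1, c2, c3, c4⟩ := hpre g hg
    exact gridA_eq g ed c1 c2 c3 c4 acc
  have hB : grids.foldlM
      (fun total g =>
        let rows := g.map String.toList
        (PySem.List.pyGet? rows 0).bind fun r0 =>
        (axesSumB rows.length (pairRowDiffB rows) ed).bind fun rsum =>
        (axesSumB r0.length (pairColDiffB rows) ed).map fun csum =>
        total + 100 * rsum + csum)
      (0 : Int) = some (grids.foldl (fun acc g => acc + pvGridVal (g.map String.toList) ed) 0) := by
    apply optFoldlM_eq_some
    intro acc g hg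
    obtain ⟨c1, c2, _, _⟩ := hpre g hg
    exact gridB_eq g ed c1 c2 acc
  rw [hA, hB]
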